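-- pv_equiv track=rewrite | github.com/Guidan/AdventofCode2023 | 01/01a.py | getcalibration
-- ===== SOURCE A (Python) =====
-- def getcalibration(string: str):
--     first_num = ""
--     last_num = ""
--     for char in string:
--         if char.isdigit():
--             if first_num == "":
--                 first_num = char
--             last_num = char
--     return int(first_num + "" + last_num)
-- ===== SOURCE B (Python) =====
-- def getcalibration(string: str):
--     first = next((c for c in string if c.isdigit()), "")
--     last = next((c for c in reversed(string) if c.isdigit()), "")
--     return int(first + last)
-- ===== Notes on version B (the rewrite author's own statement) =====
-- stated objective: idiomatic
-- what changed: The single stateful pass that tracks first_num/last_num is replaced by two directional searches: a forward search for the first digit and a search over the reversed string for the last digit.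
import Mathlib
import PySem

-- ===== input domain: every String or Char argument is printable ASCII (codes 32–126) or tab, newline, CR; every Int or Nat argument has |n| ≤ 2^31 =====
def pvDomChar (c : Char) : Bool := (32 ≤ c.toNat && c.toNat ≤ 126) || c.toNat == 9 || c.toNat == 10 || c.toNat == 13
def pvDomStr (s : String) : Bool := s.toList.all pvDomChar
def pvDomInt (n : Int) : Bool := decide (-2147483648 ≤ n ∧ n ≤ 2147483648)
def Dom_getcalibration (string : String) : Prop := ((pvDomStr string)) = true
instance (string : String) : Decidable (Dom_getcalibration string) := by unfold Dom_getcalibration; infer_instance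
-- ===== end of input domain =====

-- B replaces A's single state-tracking pass by two directional digit searches (idiomatic decomposition, same cost).

-- ===== PORT A =====
-- one pass keeping (first_num, last_num) as strings, then int(first_num + "" + last_num)
def getcalibration (string : String) : Int :=
  let st := string.toList.foldl
    (fun (p : String × String) c =>
      if PySem.Chars.isdigit c then
        (if p.1 = "" then String.ofList [c] else p.1, String.ofList [c])
      else p)
    ("", "")
  (PySem.Int.ofStr? (st.1 ++ "" ++ st.2)).getD 0

-- ===== PORT B =====
-- first digit by forward search, last digit by search on the reversed string, then int(first + last)
def getcalibration_alt (string : String) : Int :=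
  let first : String := match string.toList.find? PySem.Chars.isdigit with
    | some c => String.ofList [c]
    | none => ""
  let last : String := match string.toList.reverse.find? PySem.Chars.isdigit with
    | some c => String.ofList [c]
    | none => ""
  (PySem.Int.ofStr? (first ++ last)).getD 0

-- ===== PRECONDITION & SPEC =====
-- Pre_ excludes exactly the strings with no digit, on which A raises ValueError when converting the empty digit pair.
def Pre_getcalibration (string : String) : Prop :=
  string.toList.any PySem.Chars.isdigit = true
instance (string : String) : Decidable (Pre_getcalibration string) := by
  unfold Pre_getcalibration; infer_instance

def pvWitness_getcalibration : String := "a1b2"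

def Spec_getcalibration (string : String) (out : Int) : Prop := out = getcalibration_alt string
instance (string : String) (out : Int) : Decidable (Spec_getcalibration string out) := by
  unfold Spec_getcalibration; infer_instance

-- ===== CLAIM (what is proved, stated in full; the proofs are below) =====
def Claim_equal_getcalibration : Prop := ∀ (string : String), Dom_getcalibration string → Pre_getcalibration string → Spec_getcalibration string (getcalibration string)

-- ===== LEMMAS AND PROOFS =====

-- the loop state after consuming cs, starting from (f, l)
theorem getcalibration_loop (cs : List Char) (f l : String) :
    cs.foldl
      (fun (p : String × String) c =>
        if PySem.Chars.isdigit c then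
          (if p.1 = "" then String.ofList [c] else p.1, String.ofList [c])
        else p)
      (f, l)
    = ((if f = "" then
          match cs.find? PySem.Chars.isdigit with
          | some c => String.ofList [c]
          | none => ""
        else f),
       (match cs.reverse.find? PySem.Chars.isdigit with
        | some c => String.ofList [c]
        | none => l)) := by
  induction cs generalizing f l with
  | nil => simp
  | cons c cs ih =>
    simp only [List.foldl_cons, List.reverse_cons, List.find?_cons, List.find?_append]
    by_cases hd : PySem.Chars.isdigit c
    · rw [if_pos hd, ih]
      have hne : String.ofList [c] ≠ "" := by simp
      simp only [Prod.mk.injEq]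
      refine ⟨?_, ?_⟩
      · by_cases hf : f = "" <;> simp [hf, hd, hne]
      · cases h : cs.reverse.find? PySem.Chars.isdigit <;> simp [hd, Option.or]
    · rw [if_neg hd, ih]
      simp [hd]

-- ===== VERDICT (by name: the statement is the Claim_ definition above) =====
theorem getcalibration_spec : Claim_equal_getcalibration := by
  intro s _ _
  unfold Spec_getcalibration getcalibration getcalibration_alt
  rw [getcalibration_loop]
  simp
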